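-- pv_equiv track=rewrite | github.com/cfos3120/Torch_VFM | src/physics/utils.py | gradient_str
-- ===== SOURCE A (Python) =====
-- def gradient_str(channel, mesh_dim:int=2, order:int=1, time_dim:bool=False):
--     if mesh_dim == 2 and order == 1:
--         mesh_den_str = ['dx','dy']
--     elif mesh_dim == 2 and order == 2:
--         mesh_den_str = ['dxx','dxy','dyx','dyy']
--     elif mesh_dim == 3 and order == 1:
--         mesh_den_str = ['dx','dy','dz']
--     elif mesh_dim == 3 and order == 2:
--         mesh_den_str = ['dxx','dxy','dxz','dyx','dyy','dyz','dzx','dzy','dzz']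
--     else:
--         raise NotImplementedError(f'mesh_dim={mesh_dim} and order={order} not supported')
--
--     if channel == 'U':
--         if mesh_dim == 2:
--             mesh_num_str = ['du','dv']
--         elif mesh_dim == 3:
--             mesh_num_str = ['du','dv','dw']
--     else:
--         mesh_num_str = [f'd{channel}']
--
--     # override for time_dim
--     if time_dim:
--         mesh_den_str = ['dt']
--
--     mesh_str = [[f'{num}/{den}'for den in mesh_den_str] for num in mesh_num_str]
--     mesh_str = [item for sublist in mesh_str for item in sublist]
--     return mesh_str
-- ===== SOURCE B (Python) =====
-- def gradient_str(channel, mesh_dim:int=2, order:int=1, time_dim:bool=False):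
--     if mesh_dim not in (2, 3) or order not in (1, 2):
--         raise NotImplementedError(f'mesh_dim={mesh_dim} and order={order} not supported')
--     axes = 'xyz'[:mesh_dim]
--     if time_dim:
--         dens = ['dt']
--     elif order == 1:
--         dens = ['d' + a for a in axes]
--     else:
--         dens = ['d' + a + b for a in axes for b in axes]
--     if channel == 'U':
--         nums = ['d' + c for c in 'uvw'[:mesh_dim]]
--     else:
--         nums = ['d' + channel]
--     return [n + '/' + d for n in nums for d in dens]
-- ===== Notes on version B (the rewrite author's own statement) =====
-- stated objective: idiomatic
-- what changed: Replaces the hardcoded four-way table of denominator label lists with a cartesian product computed over the first mesh_dim axis letters, and builds the velocity numerators by slicing a component-letter string instead of branching per dimension.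
import Mathlib
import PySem

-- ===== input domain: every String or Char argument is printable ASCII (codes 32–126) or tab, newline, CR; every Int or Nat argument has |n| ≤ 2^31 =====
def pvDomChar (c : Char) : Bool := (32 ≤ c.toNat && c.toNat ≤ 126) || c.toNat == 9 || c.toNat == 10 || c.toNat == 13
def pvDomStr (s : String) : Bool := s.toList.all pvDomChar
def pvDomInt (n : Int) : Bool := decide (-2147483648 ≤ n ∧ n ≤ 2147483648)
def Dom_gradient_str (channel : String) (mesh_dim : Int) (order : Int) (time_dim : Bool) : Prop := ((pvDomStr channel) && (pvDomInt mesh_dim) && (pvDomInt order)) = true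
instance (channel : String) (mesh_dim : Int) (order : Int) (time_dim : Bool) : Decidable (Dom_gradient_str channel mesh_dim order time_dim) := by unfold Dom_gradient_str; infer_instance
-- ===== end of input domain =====

-- ===== PORT A =====
-- Port of A: hardcoded denominator tables, per-dimension numerator branches, time_dim override, nested comprehension flattened.
def gradient_str (channel : String) (mesh_dim : Int) (order : Int) (time_dim : Bool) : List String :=
  let mesh_den_str : List String :=
    if mesh_dim = 2 ∧ order = 1 then ["dx","dy"]
    else if mesh_dim = 2 ∧ order = 2 then ["dxx","dxy","dyx","dyy"]
    else if mesh_dim = 3 ∧ order = 1 then ["dx","dy","dz"]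
    else ["dxx","dxy","dxz","dyx","dyy","dyz","dzx","dzy","dzz"]
    -- final else raises NotImplementedError: excluded by Pre_gradient_str
  let mesh_num_str : List String :=
    if channel = "U" then
      if mesh_dim = 2 then ["du","dv"] else ["du","dv","dw"]
    else ["d" ++ channel]
  let mesh_den_str := if time_dim then ["dt"] else mesh_den_str
  (mesh_num_str.map (fun num => mesh_den_str.map (fun den => num ++ "/" ++ den))).flatten

-- ===== PORT B =====
-- Port of B: computed axes/letters, denominators as a cartesian product of axes, one flat product comprehension.
def gradient_str_alt (channel : String) (mesh_dim : Int) (order : Int) (time_dim : Bool) : List String :=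
  let axes : List String := if mesh_dim = 2 then ["x","y"] else ["x","y","z"]  -- 'xyz'[:mesh_dim]
  let dens : List String :=
    if time_dim then ["dt"]
    else if order = 1 then axes.map (fun a => "d" ++ a)
    else axes.flatMap (fun a => axes.map (fun b => "d" ++ a ++ b))
  let nums : List String :=
    if channel = "U" then
      (if mesh_dim = 2 then ["u","v"] else ["u","v","w"]).map (fun c => "d" ++ c)
    else ["d" ++ channel]
  nums.flatMap (fun n => dens.map (fun d => n ++ "/" ++ d))

-- ===== PRECONDITION & SPEC =====
-- Pre_ excludes exactly the inputs on which A raises NotImplementedError (mesh_dim not in {2,3} or order not in {1,2}); B raises the same error there.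
def Pre_gradient_str (channel : String) (mesh_dim : Int) (order : Int) (time_dim : Bool) : Prop :=
  (mesh_dim = 2 ∨ mesh_dim = 3) ∧ (order = 1 ∨ order = 2)
instance (channel : String) (mesh_dim : Int) (order : Int) (time_dim : Bool) : Decidable (Pre_gradient_str channel mesh_dim order time_dim) := by unfold Pre_gradient_str; infer_instance
def pvWitness_gradient_str : String × Int × Int × Bool := ("U", 2, 1, false)
def Spec_gradient_str (channel : String) (mesh_dim : Int) (order : Int) (time_dim : Bool) (out : List String) : Prop := out = gradient_str_alt channel mesh_dim order time_dim
instance (channel : String) (mesh_dim : Int) (order : Int) (time_dim : Bool) (out : List String) : Decidable (Spec_gradient_str channel mesh_dim order time_dim out) := by unfold Spec_gradient_str; infer_instance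

-- ===== CLAIM =====
def Claim_equal_gradient_str : Prop := ∀ (channel : String) (mesh_dim : Int) (order : Int) (time_dim : Bool), Dom_gradient_str channel mesh_dim order time_dim → Pre_gradient_str channel mesh_dim order time_dim → Spec_gradient_str channel mesh_dim order time_dim (gradient_str channel mesh_dim order time_dim)

-- ===== LEMMAS AND PROOFS =====
theorem gradient_str_eq_alt (channel : String) (mesh_dim : Int) (order : Int) (time_dim : Bool)
    (h : Pre_gradient_str channel mesh_dim order time_dim) :
    gradient_str channel mesh_dim order time_dim = gradient_str_alt channel mesh_dim order time_dim := by
  obtain ⟨hm, ho⟩ := h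
  cases time_dim <;> rcases hm with hm | hm <;> rcases ho with ho | ho <;> subst hm <;> subst ho <;>
    by_cases hc : channel = "U" <;>
    simp [gradient_str, gradient_str_alt, hc]

-- ===== VERDICT =====
theorem gradient_str_spec : Claim_equal_gradient_str := by
  intro channel mesh_dim order time_dim _ hpre
  exact gradient_str_eq_alt channel mesh_dim order time_dim hpre
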